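-- pv_equiv track=rewrite | github.com/colding10/cp-notebook | solutions/usaco-contest/Past Contests/Year of the Cow/yearofcow.py | calculate_delta
-- ===== SOURCE A (Python) =====
-- def calculate_delta(relative, z1, z2):
--     x1 = cycle.index(z1)
--
--     change = 0
--     if relative == "next":
--         while cycle[x1] != z2:
--             change += 1
--             x1 = x1 + 1 if x1 < 11 else 0
--
--     else:
--         while cycle[x1] != z2:
--             change -= 1
--             x1 = x1 - 1 if x1 > 0 else 11
--
--     return change
--
-- cycle = [
--     "Ox",
--     "Tiger",
--     "Rabbit",
--     "Dragon",
--     "Snake",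
--     "Horse",
--     "Goat",
--     "Monkey",
--     "Rooster",
--     "Dog",
--     "Pig",
--     "Rat",
-- ]
-- ===== SOURCE B (Python) =====
-- cycle = [
--     "Ox",
--     "Tiger",
--     "Rabbit",
--     "Dragon",
--     "Snake",
--     "Horse",
--     "Goat",
--     "Monkey",
--     "Rooster",
--     "Dog",
--     "Pig",
--     "Rat",
-- ]
--
--
-- def calculate_delta(relative, z1, z2):
--     i1 = cycle.index(z1)
--     i2 = cycle.index(z2)
--     if relative == "next":
--         return (i2 - i1) % 12
--     return -((i1 - i2) % 12)
-- ===== Notes on version B (the rewrite author's own statement) =====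
-- stated objective: simpler
-- what changed: Replaces the step-by-step while-loop walk around the 12-element ring with a closed-form signed offset computed from the two indices by modular arithmetic.
import Mathlib
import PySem

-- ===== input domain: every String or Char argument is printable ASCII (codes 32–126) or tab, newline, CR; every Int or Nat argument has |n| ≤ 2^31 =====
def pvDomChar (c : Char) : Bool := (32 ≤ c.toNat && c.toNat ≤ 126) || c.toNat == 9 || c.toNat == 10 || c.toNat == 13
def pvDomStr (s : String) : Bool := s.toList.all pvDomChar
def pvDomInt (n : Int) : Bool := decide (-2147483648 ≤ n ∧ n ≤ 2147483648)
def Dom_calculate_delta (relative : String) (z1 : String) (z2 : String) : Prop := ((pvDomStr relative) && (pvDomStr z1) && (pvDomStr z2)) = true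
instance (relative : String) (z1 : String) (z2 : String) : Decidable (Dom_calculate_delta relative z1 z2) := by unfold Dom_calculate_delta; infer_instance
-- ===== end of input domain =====

-- B replaces A's step-by-step ring walk with a closed-form modular-arithmetic offset (simpler; no speed claim).


-- ===== PORT A =====
def cycleL : List String :=
  ["Ox", "Tiger", "Rabbit", "Dragon", "Snake", "Horse", "Goat", "Monkey",
   "Rooster", "Dog", "Pig", "Rat"]

-- the while-loop of A; fuel 12 covers every start position before the walk
-- revisits x1 (on inputs outside Pre_, where the Python loop never terminates,
-- the fuel runs out and the accumulated change is returned; nothing is claimed there)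
def loopNext (z2 : String) : Nat → Nat → Int → Int
  | 0, _, change => change
  | fuel + 1, x1, change =>
    if cycleL.getD x1 "" ≠ z2 then
      loopNext z2 fuel (if x1 < 11 then x1 + 1 else 0) (change + 1)
    else change

def loopPrev (z2 : String) : Nat → Nat → Int → Int
  | 0, _, change => change
  | fuel + 1, x1, change =>
    if cycleL.getD x1 "" ≠ z2 then
      loopPrev z2 fuel (if x1 > 0 then x1 - 1 else 11) (change - 1)
    else change

def calculate_delta (relative : String) (z1 : String) (z2 : String) : Int :=
  match PySem.List.index? cycleL z1 with
  | none => 0   -- ValueError in Python; excluded by Pre_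
  | some x1 =>
    if relative == "next" then loopNext z2 12 x1 0
    else loopPrev z2 12 x1 0

-- ===== PORT B =====
def calculate_delta_alt (relative : String) (z1 : String) (z2 : String) : Int :=
  match PySem.List.index? cycleL z1, PySem.List.index? cycleL z2 with
  | some i1, some i2 =>
    if relative == "next" then PySem.Int.mod ((i2 : Int) - i1) 12
    else -(PySem.Int.mod ((i1 : Int) - i2) 12)
  | _, _ => 0   -- ValueError in Python; excluded by Pre_

-- ===== PRECONDITION & SPEC =====
-- Pre_ excludes exactly the inputs on which Python A does not return: z1 not in
-- cycle (A raises ValueError) or z2 not in cycle (A's while-loop never terminates).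
def Pre_calculate_delta (relative : String) (z1 : String) (z2 : String) : Prop :=
  z1 ∈ cycleL ∧ z2 ∈ cycleL
instance (relative : String) (z1 : String) (z2 : String) : Decidable (Pre_calculate_delta relative z1 z2) := by unfold Pre_calculate_delta; infer_instance
def pvWitness_calculate_delta : String × String × String := ("next", "Ox", "Dog")

def Spec_calculate_delta (relative : String) (z1 : String) (z2 : String) (out : Int) : Prop := out = calculate_delta_alt relative z1 z2
instance (relative : String) (z1 : String) (z2 : String) (out : Int) : Decidable (Spec_calculate_delta relative z1 z2 out) := by unfold Spec_calculate_delta; infer_instance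

-- ===== CLAIM (what is proved, stated in full; the proofs are below) =====
def Claim_equal_calculate_delta : Prop := ∀ (relative : String) (z1 : String) (z2 : String), Dom_calculate_delta relative z1 z2 → Pre_calculate_delta relative z1 z2 → Spec_calculate_delta relative z1 z2 (calculate_delta relative z1 z2)

-- ===== LEMMAS AND PROOFS =====

-- both ports branch on relative only through the Bool (relative == "next");
-- for z1, z2 in the cycle the two branch values agree, checked case by case.
lemma core_eq (b : Bool) (z1 z2 : String) (h1 : z1 ∈ cycleL) (h2 : z2 ∈ cycleL) :
    (match PySem.List.index? cycleL z1 with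
     | none => (0 : Int)
     | some x1 => if b then loopNext z2 12 x1 0 else loopPrev z2 12 x1 0) =
    (match PySem.List.index? cycleL z1, PySem.List.index? cycleL z2 with
     | some i1, some i2 =>
        if b then PySem.Int.mod ((i2 : Int) - i1) 12
        else -(PySem.Int.mod ((i1 : Int) - i2) 12)
     | _, _ => (0 : Int)) := by
  fin_cases h1 <;> fin_cases h2 <;> cases b <;> decide

-- ===== VERDICT (by name: the statement is the Claim_ definition above) =====
theorem calculate_delta_spec : Claim_equal_calculate_delta := by
  intro relative z1 z2 _ hpre
  unfold Spec_calculate_delta calculate_delta calculate_delta_alt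
  exact core_eq (relative == "next") z1 z2 hpre.1 hpre.2
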